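-- pv_equiv track=rewrite | github.com/milanstanisic/MLT-Thesis-LT2215 | Language_model_data_splitting.py | seek_mentions
-- ===== SOURCE A (Python) =====
-- def seek_mentions(x):
--     if x is None:
--         return x
--     users = []
--     user = False
--     for element in x:
--         if element == '@':
--             user = True
--             continue
--         if user:
--             users.append('@' + element)
--             user = False
--     return users
-- ===== SOURCE B (Python) =====
-- def seek_mentions(x):
--     if x is None:
--         return x
--     xs = list(x)
--     return ['@' + b for a, b in zip(xs, xs[1:]) if a == '@' and b != '@']
-- ===== Notes on version B (the rewrite author's own statement) =====
-- stated objective: simpler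
-- what changed: Replaces the boolean-flag state machine with a stateless pairwise (zip with the tail) comprehension that collects '@'+b whenever the previous element is '@' and the current one is not.
import Mathlib
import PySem

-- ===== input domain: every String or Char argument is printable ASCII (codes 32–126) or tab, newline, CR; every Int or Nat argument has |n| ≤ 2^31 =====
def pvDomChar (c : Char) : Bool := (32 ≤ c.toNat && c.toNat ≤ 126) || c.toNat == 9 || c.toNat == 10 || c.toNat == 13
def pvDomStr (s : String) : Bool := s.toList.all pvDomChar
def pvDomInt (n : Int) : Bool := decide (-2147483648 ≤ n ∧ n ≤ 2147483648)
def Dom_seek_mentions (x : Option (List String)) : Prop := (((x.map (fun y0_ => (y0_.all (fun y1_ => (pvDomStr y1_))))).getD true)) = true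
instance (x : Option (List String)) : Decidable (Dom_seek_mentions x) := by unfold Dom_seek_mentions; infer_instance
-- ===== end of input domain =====

-- B replaces A's boolean-flag single-pass state machine with a stateless pairwise
-- (zip-with-tail) comprehension; objective: simpler.


-- ===== PORT A =====
-- A's loop: state (users, user-flag), set flag on '@', collect '@'+element when flag set.
def seek_mentions (x : Option (List String)) : Option (List String) :=
  match x with
  | none => none
  | some xs =>
    some ((xs.foldl (fun (s : List String × Bool) element =>
      if element = "@" then (s.1, true)
      else if s.2 then (s.1 ++ ["@" ++ element], false)
      else (s.1, false)) ([], false)).1)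

-- ===== PORT B =====
-- B: pairwise scan — collect '@'+b for adjacent pairs (a, b) with a = '@' and b ≠ '@'.
def seek_mentions_alt (x : Option (List String)) : Option (List String) :=
  match x with
  | none => none
  | some xs =>
    some ((xs.zip xs.tail).filterMap (fun p =>
      if p.1 = "@" ∧ ¬ p.2 = "@" then some ("@" ++ p.2) else none))

-- ===== PRECONDITION & SPEC =====
def Spec_seek_mentions (x : Option (List String)) (out : Option (List String)) : Prop := out = seek_mentions_alt x
instance (x : Option (List String)) (out : Option (List String)) : Decidable (Spec_seek_mentions x out) := by unfold Spec_seek_mentions; infer_instance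

-- ===== CLAIM (what is proved, stated in full; the proofs are below) =====
def Claim_equal_seek_mentions : Prop := ∀ (x : Option (List String)), Dom_seek_mentions x → Spec_seek_mentions x (seek_mentions x)

-- ===== LEMMAS AND PROOFS =====

-- Recursive rendering of A's loop body (flag u = "previous element was '@'" after dispatch).
def loopA : List String → Bool → List String
  | [], _ => []
  | e :: rest, u =>
    if e = "@" then loopA rest true
    else if u then ("@" ++ e) :: loopA rest false
    else loopA rest false

def pairsB (xs : List String) : List String :=
  (xs.zip xs.tail).filterMap (fun p =>
    if p.1 = "@" ∧ ¬ p.2 = "@" then some ("@" ++ p.2) else none)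

lemma foldl_eq_loopA (xs : List String) (acc : List String) (u : Bool) :
    (xs.foldl (fun (s : List String × Bool) element =>
      if element = "@" then (s.1, true)
      else if s.2 then (s.1 ++ ["@" ++ element], false)
      else (s.1, false)) (acc, u)).1 = acc ++ loopA xs u := by
  induction xs generalizing acc u with
  | nil => simp [loopA]
  | cons e rest ih =>
    simp only [List.foldl_cons, loopA]
    by_cases he : e = "@"
    · simp [he, ih]
    · by_cases hu : u <;> simp [he, hu, ih]

lemma loopA_eq_pairsB_cons (xs : List String) (a : String) :
    loopA xs (decide (a = "@")) = pairsB (a :: xs) := by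
  induction xs generalizing a with
  | nil => cases h : decide (a = "@") <;> simp_all [loopA, pairsB]
  | cons b rest ih =>
    have hb := ih b
    by_cases hbA : b = "@"
    · have : loopA rest true = pairsB (b :: rest) := by simpa [hbA] using hb
      by_cases haA : a = "@" <;>
        simp [loopA, pairsB, hbA, haA, this, List.zip]
    · have : loopA rest false = pairsB (b :: rest) := by simpa [hbA] using hb
      by_cases haA : a = "@" <;>
        simp [loopA, pairsB, hbA, haA, this, List.zip]

lemma loopA_false_eq_pairsB (xs : List String) : loopA xs false = pairsB xs := by
  cases xs with
  | nil => simp [loopA, pairsB]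
  | cons a rest =>
    have h := loopA_eq_pairsB_cons rest a
    by_cases haA : a = "@"
    · simpa [loopA, haA] using h
    · simpa [loopA, haA] using h

-- ===== VERDICT (by name: the statement is the Claim_ definition above) =====
theorem seek_mentions_spec : Claim_equal_seek_mentions := by
  intro x _
  unfold Spec_seek_mentions seek_mentions seek_mentions_alt
  cases x with
  | none => rfl
  | some xs =>
    simp only [foldl_eq_loopA xs [] false, List.nil_append,
      loopA_false_eq_pairsB xs, pairsB]
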